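-- pv_equiv track=rewrite | github.com/aliyilmazz/leetcode | python_solutions/blind_top75/73_serialize_and_deserialize_bst.py | eraseOverlapIntervals_soln1
-- ===== SOURCE A (Python) =====
-- from typing import List
--
-- def eraseOverlapIntervals_soln1(intervals: List[List[int]]) -> int:
--     n = len(intervals)
--
--     if not n:
--         return 0
--
--     intervals = sorted(intervals, key=lambda x: (x[0], x[1]))
--     dp = [0] * n
--     dp[0] = 1
--
--     for i in range(1, n):
--         max_value = 0
--         for j in range(i):
--             if intervals[j][1] <= intervals[i][0]:
--                 max_value = max(max_value, dp[j])
--             dp[i] = max_value + 1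
--
--     non_overlapping_intervals = max(dp)
--     return n - non_overlapping_intervals
-- ===== SOURCE B (Python) =====
-- from typing import List
--
-- def eraseOverlapIntervals_soln1(intervals: List[List[int]]) -> int:
--     removed = 0
--     prev_end = None
--     for start, end in sorted((iv[0], iv[1]) for iv in intervals):
--         if prev_end is None or start >= prev_end:
--             prev_end = end
--         else:
--             removed += 1
--             prev_end = min(prev_end, end)
--     return removed
-- ===== Notes on version B (the rewrite author's own statement) =====
-- stated objective: faster
-- what changed: Replaces the O(n^2) longest-chain dynamic program over all earlier intervals with a sort plus a single greedy pass that keeps a running removal count and the minimal reachable end time.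
import Mathlib
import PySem

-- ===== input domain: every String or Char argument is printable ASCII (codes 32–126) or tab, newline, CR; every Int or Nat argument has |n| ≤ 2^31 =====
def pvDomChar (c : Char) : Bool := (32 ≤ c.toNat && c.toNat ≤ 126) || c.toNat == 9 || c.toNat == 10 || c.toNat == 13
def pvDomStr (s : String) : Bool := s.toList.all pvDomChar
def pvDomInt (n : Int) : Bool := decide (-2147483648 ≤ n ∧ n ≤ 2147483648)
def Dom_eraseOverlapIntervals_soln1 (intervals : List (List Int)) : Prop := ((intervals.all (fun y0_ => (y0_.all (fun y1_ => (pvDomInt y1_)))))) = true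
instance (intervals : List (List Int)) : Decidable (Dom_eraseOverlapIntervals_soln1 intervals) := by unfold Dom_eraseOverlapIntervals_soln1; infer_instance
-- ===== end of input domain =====

-- B replaces A's O(n^2) longest-chain DP by one sort plus a single greedy pass
-- (running removal count + minimal reachable end); same return value on Pre_.

-- ===== PORT A =====
-- intervals[k][0] / intervals[k][1]; the default never fires under Pre_ (length ≥ 2)
def pvKey0 (iv : List Int) : Int := PySem.List.pyGetD iv 0 0
def pvKey1 (iv : List Int) : Int := PySem.List.pyGetD iv 1 0

def eraseOverlapIntervals_soln1 (intervals : List (List Int)) : Int :=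
  let n : Int := intervals.length
  if n = 0 then 0
  else
    let ivs := PySem.List.sorted2 intervals pvKey0 pvKey1 false
    let dp0 : List Int := PySem.List.pySetD (List.replicate intervals.length (0 : Int)) 0 1
    let dp := (PySem.List.pyRange 1 n).foldl (fun dp i =>
        ((PySem.List.pyRange 0 i).foldl (fun (st : Int × List Int) j =>
            let mv := if pvKey1 (PySem.List.pyGetD ivs j []) ≤ pvKey0 (PySem.List.pyGetD ivs i []) then
                        max st.1 (PySem.List.pyGetD st.2 j 0) else st.1
            (mv, PySem.List.pySetD st.2 i (mv + 1))) ((0 : Int), dp)).2) dp0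
    n - ((PySem.List.max? dp (fun x => x)).getD 0)

-- ===== PORT B =====
def pvGStep (st : Int × Option Int) (p : Int × Int) : Int × Option Int :=
  match st.2 with
  | none => (st.1, some p.2)
  | some pe => if pe ≤ p.1 then (st.1, some p.2) else (st.1 + 1, some (min pe p.2))

def eraseOverlapIntervals_soln1_alt (intervals : List (List Int)) : Int :=
  let pairs := intervals.map (fun iv => (pvKey0 iv, pvKey1 iv))
  let sp := PySem.List.sorted2 pairs Prod.fst Prod.snd false
  (sp.foldl pvGStep ((0 : Int), none)).1

-- ===== PRECONDITION & SPEC =====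
-- Pre_ excludes exactly the inputs where Python A raises IndexError (an interval with fewer than 2 entries)
def Pre_eraseOverlapIntervals_soln1 (intervals : List (List Int)) : Prop :=
  ∀ iv ∈ intervals, 2 ≤ iv.length
instance (intervals : List (List Int)) : Decidable (Pre_eraseOverlapIntervals_soln1 intervals) := by
  unfold Pre_eraseOverlapIntervals_soln1; infer_instance
def pvWitness_eraseOverlapIntervals_soln1 : List (List Int) := [[1, 2], [0, 3]]

def Spec_eraseOverlapIntervals_soln1 (intervals : List (List Int)) (out : Int) : Prop := out = eraseOverlapIntervals_soln1_alt intervals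
instance (intervals : List (List Int)) (out : Int) : Decidable (Spec_eraseOverlapIntervals_soln1 intervals out) := by unfold Spec_eraseOverlapIntervals_soln1; infer_instance

-- ===== CLAIM (what is proved, stated in full; the proofs are below) =====
def Claim_equal_eraseOverlapIntervals_soln1 : Prop := ∀ (intervals : List (List Int)), Dom_eraseOverlapIntervals_soln1 intervals → Pre_eraseOverlapIntervals_soln1 intervals → Spec_eraseOverlapIntervals_soln1 intervals (eraseOverlapIntervals_soln1 intervals)

-- ===== LEMMAS AND PROOFS =====

-- The clean longest-chain DP that A's array code computes on the keyed pairs.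
def pvMaxOver (acc : List ((Int × Int) × Int)) (s : Int) : Int :=
  acc.foldl (fun m q => if q.1.2 ≤ s then max m q.2 else m) 0
def pvEntryStep (acc : List ((Int × Int) × Int)) (p : Int × Int) : List ((Int × Int) × Int) :=
  acc ++ [(p, 1 + pvMaxOver acc p.1)]
def pvDP (xs : List (Int × Int)) : List ((Int × Int) × Int) := xs.foldl pvEntryStep []

def pvF (iv : List Int) : Int × Int := (pvKey0 iv, pvKey1 iv)

-- greedy/DP coupling invariant: K is the max dp value, cur the least end among max entries,
-- and every entry of dp value ≥ 2 has a compatible predecessor one level down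
def pvInv (acc : List ((Int × Int) × Int)) (K cur : Int) : Prop :=
  (∀ q ∈ acc, 1 ≤ q.2 ∧ q.2 ≤ K) ∧
  (∃ q ∈ acc, q.2 = K ∧ q.1.2 = cur) ∧
  (∀ q ∈ acc, q.2 = K → cur ≤ q.1.2) ∧
  (∀ q ∈ acc, 2 ≤ q.2 → ∃ q' ∈ acc, q'.1.2 ≤ q.1.1 ∧ q'.2 = q.2 - 1)

-- generic facts about the filtered running max
theorem pvMaxfold_init_le (s : Int) (acc : List ((Int × Int) × Int)) (m0 : Int) :
    m0 ≤ acc.foldl (fun m q => if q.1.2 ≤ s then max m q.2 else m) m0 := by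
  induction acc generalizing m0 with
  | nil => simp
  | cons q t ih =>
    simp only [List.foldl_cons]
    refine le_trans ?_ (ih _)
    split <;> simp

theorem pvMaxfold_mem_le (s : Int) :
    ∀ (acc : List ((Int × Int) × Int)) (m0 : Int) (q : (Int × Int) × Int),
      q ∈ acc → q.1.2 ≤ s →
      q.2 ≤ acc.foldl (fun m q => if q.1.2 ≤ s then max m q.2 else m) m0 := by
  intro acc
  induction acc with
  | nil => intro m0 q hq; cases hq
  | cons r t ih =>
    intro m0 q hq hcond
    simp only [List.foldl_cons]
    rcases List.mem_cons.mp hq with h | h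
    · subst h
      refine le_trans ?_ (pvMaxfold_init_le s t _)
      simp [hcond]
    · exact ih _ q h hcond

theorem pvMaxfold_le (s B : Int) :
    ∀ (acc : List ((Int × Int) × Int)) (m0 : Int),
      (∀ q ∈ acc, q.1.2 ≤ s → q.2 ≤ B) → m0 ≤ B →
      acc.foldl (fun m q => if q.1.2 ≤ s then max m q.2 else m) m0 ≤ B := by
  intro acc
  induction acc with
  | nil => intro m0 _ h0; simpa
  | cons r t ih =>
    intro m0 hB h0
    simp only [List.foldl_cons]
    refine ih _ (fun q hq hc => hB q (List.mem_cons_of_mem _ hq) hc) ?_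
    split
    · exact max_le h0 (hB r (List.mem_cons_self) (by assumption))
    · exact h0

-- one combined step: what pvMaxOver is, and that the invariant is preserved
theorem pvStep_keep (acc : List ((Int × Int) × Int)) (K cur s e : Int)
    (h : pvInv acc K cur) (hcs : cur ≤ s) :
    pvMaxOver acc s = K ∧ pvInv (pvEntryStep acc (s, e)) (K + 1) e := by
  obtain ⟨hA, ⟨q0, hq0m, hq0K, hq0e⟩, hC, hD⟩ := h
  have hK1 : 1 ≤ K := hq0K ▸ (hA q0 hq0m).1
  have hle : pvMaxOver acc s ≤ K :=
    pvMaxfold_le s K acc 0 (fun q hq _ => (hA q hq).2) (by omega)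
  have hge : K ≤ pvMaxOver acc s := by
    have := pvMaxfold_mem_le s acc 0 q0 hq0m (by rw [hq0e]; exact hcs)
    rwa [hq0K] at this
  have hM : pvMaxOver acc s = K := le_antisymm hle hge
  refine ⟨hM, ?_, ?_, ?_, ?_⟩
  · intro q hq
    rcases List.mem_append.mp hq with h | h
    · exact ⟨(hA q h).1, by linarith [(hA q h).2]⟩
    · simp only [List.mem_singleton] at h; subst h; simp only; rw [hM]; omega
  · exact ⟨((s, e), 1 + pvMaxOver acc s), by simp [pvEntryStep], by rw [hM]; ring, rfl⟩
  · intro q hq hqK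
    rcases List.mem_append.mp hq with h | h
    · exact absurd hqK (by have := (hA q h).2; omega)
    · simp only [List.mem_singleton] at h; subst h; simp
  · intro q hq hq2
    rcases List.mem_append.mp hq with h | h
    · obtain ⟨q', hq', hh⟩ := hD q h hq2
      exact ⟨q', List.mem_append_left _ hq', hh⟩
    · simp only [List.mem_singleton] at h; subst h
      refine ⟨q0, List.mem_append_left _ hq0m, ?_, ?_⟩
      · simpa [hq0e] using hcs
      · rw [hM, hq0K]; ring

theorem pvStep_skip (acc : List ((Int × Int) × Int)) (K cur s e : Int)
    (h : pvInv acc K cur) (hsc : s < cur) (hst : ∀ q ∈ acc, q.1.1 ≤ s) :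
    pvMaxOver acc s = K - 1 ∧ pvInv (pvEntryStep acc (s, e)) K (min cur e) := by
  obtain ⟨hA, ⟨q0, hq0m, hq0K, hq0e⟩, hC, hD⟩ := h
  have hK1 : 1 ≤ K := hq0K ▸ (hA q0 hq0m).1
  have hle : pvMaxOver acc s ≤ K - 1 := by
    refine pvMaxfold_le s (K - 1) acc 0 ?_ (by omega)
    intro q hq hc
    by_cases hqK : q.2 = K
    · exact absurd (le_trans (hC q hq hqK) hc) (not_le.mpr hsc)
    · have := (hA q hq).2; omega
  have hge : K - 1 ≤ pvMaxOver acc s := by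
    by_cases hK2 : 2 ≤ K
    · obtain ⟨q', hq'm, hq'le, hq'v⟩ := hD q0 hq0m (by omega)
      have : q'.2 ≤ pvMaxOver acc s :=
        pvMaxfold_mem_le s acc 0 q' hq'm (le_trans hq'le (hst q0 hq0m))
      omega
    · have := pvMaxfold_init_le s acc 0; unfold pvMaxOver; omega
  have hM : pvMaxOver acc s = K - 1 := le_antisymm hle hge
  refine ⟨hM, ?_, ?_, ?_, ?_⟩
  · intro q hq
    rcases List.mem_append.mp hq with h | h
    · exact hA q h
    · simp only [List.mem_singleton] at h; subst h; simp only; rw [hM]; omega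
  · by_cases he : e ≤ cur
    · refine ⟨((s, e), 1 + pvMaxOver acc s), by simp [pvEntryStep], by rw [hM]; ring, ?_⟩
      exact (min_eq_right he).symm
    · exact ⟨q0, List.mem_append_left _ hq0m, hq0K, by
        rw [hq0e]; exact (min_eq_left (by omega)).symm⟩
  · intro q hq hqK
    rcases List.mem_append.mp hq with h | h
    · exact le_trans (min_le_left _ _) (hC q h hqK)
    · simp only [List.mem_singleton] at h; subst h
      exact min_le_right _ _
  · intro q hq hq2
    rcases List.mem_append.mp hq with h | h
    · obtain ⟨q', hq', hh⟩ := hD q h hq2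
      exact ⟨q', List.mem_append_left _ hq', hh⟩
    · simp only [List.mem_singleton] at h; subst h
      simp only at hq2 ⊢
      obtain ⟨q', hq'm, hq'le, hq'v⟩ := hD q0 hq0m (by omega)
      refine ⟨q', List.mem_append_left _ hq'm, le_trans hq'le (hst q0 hq0m), by omega⟩

theorem pvMain (rest : List (Int × Int)) :
    ∀ (acc : List ((Int × Int) × Int)) (K cur R : Int),
      pvInv acc K cur →
      (∀ q ∈ acc, ∀ r ∈ rest, q.1.1 ≤ r.1) →
      rest.Pairwise (fun a b => a.1 ≤ b.1) →
      ∃ K' cur', pvInv (rest.foldl pvEntryStep acc) K' cur' ∧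
        rest.foldl pvGStep (R, some cur) = (R + ((rest.length : Int) - (K' - K)), some cur') := by
  induction rest with
  | nil =>
    intro acc K cur R hInv _ _
    exact ⟨K, cur, hInv, by simp⟩
  | cons p rest' ih =>
    intro acc K cur R hInv hst hsorted
    obtain ⟨s, e⟩ := p
    have hp : ∀ r ∈ rest', s ≤ r.1 := by
      intro r hr; exact List.pairwise_cons.mp hsorted |>.1 r hr
    have hrest : rest'.Pairwise (fun a b => a.1 ≤ b.1) := (List.pairwise_cons.mp hsorted).2
    have hstp : ∀ q ∈ acc, q.1.1 ≤ s := fun q hq => hst q hq (s, e) List.mem_cons_self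
    have hst' : ∀ q ∈ pvEntryStep acc (s, e), ∀ r ∈ rest', q.1.1 ≤ r.1 := by
      intro q hq r hr
      rcases List.mem_append.mp hq with h | h
      · exact hst q h r (List.mem_cons_of_mem _ hr)
      · simp only [List.mem_singleton] at h; subst h; exact hp r hr
    by_cases hc : cur ≤ s
    · obtain ⟨_, hInv'⟩ := pvStep_keep acc K cur s e hInv hc
      obtain ⟨K', cur', h1, h2⟩ := ih (pvEntryStep acc (s, e)) (K + 1) e R hInv' hst' hrest
      refine ⟨K', cur', h1, ?_⟩
      have hg : pvGStep (R, some cur) (s, e) = (R, some e) := by simp [pvGStep, hc]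
      rw [List.foldl_cons, hg, h2]
      congr 1
      simp only [List.length_cons]
      push_cast
      ring
    · obtain ⟨_, hInv'⟩ := pvStep_skip acc K cur s e hInv (not_le.mp hc) hstp
      obtain ⟨K', cur', h1, h2⟩ := ih (pvEntryStep acc (s, e)) K (min cur e) (R + 1) hInv' hst' hrest
      refine ⟨K', cur', h1, ?_⟩
      have hg : pvGStep (R, some cur) (s, e) = (R + 1, some (min cur e)) := by simp [pvGStep, hc]
      rw [List.foldl_cons, hg, h2]
      congr 1
      simp only [List.length_cons]
      push_cast
      ring

-- insertion-sort order facts, specialised to the lexicographic 'before' on pairs of ints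
def pvBefore (a b : Int × Int) : Bool :=
  decide (a.1 < b.1) || (!decide (b.1 < a.1) && decide (a.2 < b.2))

theorem pvSorted2_pairs_eq (xs : List (Int × Int)) :
    PySem.List.sorted2 xs Prod.fst Prod.snd false =
      xs.foldl (fun acc x => PySem.List.insertBy pvBefore x acc) [] := rfl

theorem pvBefore_asymm (a b : Int × Int) (h : pvBefore a b = true) : pvBefore b a = false := by
  simp only [pvBefore, Bool.or_eq_true, Bool.and_eq_true, Bool.not_eq_true',
    decide_eq_true_eq, decide_eq_false_iff_not, Bool.or_eq_false_iff, Bool.and_eq_false_iff,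
    Bool.not_eq_false'] at *
  omega

theorem pvBefore_transfer (x y z : Int × Int) (h1 : pvBefore x y = true)
    (h2 : pvBefore z y = false) : pvBefore z x = false := by
  simp only [pvBefore, Bool.or_eq_true, Bool.and_eq_true, Bool.not_eq_true',
    decide_eq_true_eq, decide_eq_false_iff_not, Bool.or_eq_false_iff, Bool.and_eq_false_iff,
    Bool.not_eq_false'] at *
  omega

theorem pvInsertBy_pairwise (x : Int × Int) (acc : List (Int × Int))
    (h : acc.Pairwise (fun a b => pvBefore b a = false)) :
    (PySem.List.insertBy pvBefore x acc).Pairwise (fun a b => pvBefore b a = false) := by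
  induction acc with
  | nil => simp [PySem.List.insertBy]
  | cons y ys ih =>
    obtain ⟨hy, hys⟩ := List.pairwise_cons.mp h
    by_cases hb : pvBefore x y = true
    · rw [PySem.List.insertBy, if_pos hb]
      refine List.pairwise_cons.mpr ⟨?_, h⟩
      intro z hz
      rcases List.mem_cons.mp hz with h' | h'
      · exact h' ▸ pvBefore_asymm x y hb
      · exact pvBefore_transfer x y z hb (hy z h')
    · rw [PySem.List.insertBy, if_neg hb]
      refine List.pairwise_cons.mpr ⟨?_, ih hys⟩
      intro z hz
      rcases (PySem.List.mem_insertBy _ _ _ _).mp hz with h' | h'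
      · exact h' ▸ Bool.eq_false_iff.mpr hb
      · exact hy z h'

theorem pvSorted2_pairwise_before (xs : List (Int × Int)) :
    (PySem.List.sorted2 xs Prod.fst Prod.snd false).Pairwise (fun a b => pvBefore b a = false) := by
  rw [pvSorted2_pairs_eq]
  suffices h : ∀ (acc : List (Int × Int)), acc.Pairwise (fun a b => pvBefore b a = false) →
      (xs.foldl (fun acc x => PySem.List.insertBy pvBefore x acc) acc).Pairwise
        (fun a b => pvBefore b a = false) by
    exact h [] (by simp)
  induction xs with
  | nil => intro acc h; simpa using h
  | cons p t ih =>
    intro acc h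
    exact ih _ (pvInsertBy_pairwise p acc h)

theorem pvSorted2_pairwise_fst (xs : List (Int × Int)) :
    (PySem.List.sorted2 xs Prod.fst Prod.snd false).Pairwise (fun a b => a.1 ≤ b.1) := by
  refine (pvSorted2_pairwise_before xs).imp ?_
  intro a b h
  simp only [pvBefore, Bool.or_eq_false_iff, decide_eq_false_iff_not] at h
  omega

-- keyed sort of the interval lists = sort of the keyed pairs
theorem pvMap_insertBy (x : List Int) (acc : List (List Int)) :
    (PySem.List.insertBy (fun a b =>
        decide (pvKey0 a < pvKey0 b) || (!decide (pvKey0 b < pvKey0 a) && decide (pvKey1 a < pvKey1 b)))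
        x acc).map pvF =
      PySem.List.insertBy pvBefore (pvF x) (acc.map pvF) := by
  induction acc with
  | nil => simp [PySem.List.insertBy]
  | cons y ys ih =>
    have hb : (decide (pvKey0 x < pvKey0 y) || (!decide (pvKey0 y < pvKey0 x) && decide (pvKey1 x < pvKey1 y)))
        = pvBefore (pvF x) (pvF y) := rfl
    by_cases h : pvBefore (pvF x) (pvF y) = true
    · rw [PySem.List.insertBy, if_pos (hb.trans h), List.map_cons, List.map_cons,
        PySem.List.insertBy, if_pos h]
    · rw [PySem.List.insertBy, if_neg (by rw [hb]; exact h), List.map_cons, List.map_cons,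
        PySem.List.insertBy, if_neg h, ih]

theorem pvMap_sorted2 (xs : List (List Int)) :
    (PySem.List.sorted2 xs pvKey0 pvKey1 false).map pvF =
      PySem.List.sorted2 (xs.map pvF) Prod.fst Prod.snd false := by
  rw [pvSorted2_pairs_eq]
  show (xs.foldl (fun acc x => PySem.List.insertBy _ x acc) []).map pvF = _
  suffices h : ∀ (acc : List (List Int)),
      (xs.foldl (fun acc x => PySem.List.insertBy (fun a b =>
          decide (pvKey0 a < pvKey0 b) || (!decide (pvKey0 b < pvKey0 a) && decide (pvKey1 a < pvKey1 b)))
          x acc) acc).map pvF =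
        (xs.map pvF).foldl (fun acc x => PySem.List.insertBy pvBefore x acc) (acc.map pvF) by
    simpa using h []
  induction xs with
  | nil => intro acc; simp
  | cons p t ih =>
    intro acc
    simp only [List.foldl_cons, List.map_cons]
    rw [ih, pvMap_insertBy]

-- structure of pvDP
theorem pvDP_foldl_fst (ys : List (Int × Int)) (acc : List ((Int × Int) × Int)) :
    (ys.foldl pvEntryStep acc).map (·.1) = acc.map (·.1) ++ ys := by
  induction ys generalizing acc with
  | nil => simp
  | cons p t ih => simp [List.foldl_cons, ih, pvEntryStep]

theorem pvDP_fst (ys : List (Int × Int)) : (pvDP ys).map (·.1) = ys := by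
  simpa using pvDP_foldl_fst ys []

theorem pvDP_length (ys : List (Int × Int)) : (pvDP ys).length = ys.length := by
  have := congrArg List.length (pvDP_fst ys); simpa using this

theorem pvDP_snoc (ys : List (Int × Int)) (p : Int × Int) :
    pvDP (ys ++ [p]) = pvEntryStep (pvDP ys) p := by
  simp [pvDP, List.foldl_append]

-- A's array loops compute pvDP: first, the inner loop only writes index m and reads below it,
-- so the threaded dp splits into a pure running max plus one final write
theorem pvInner_sep (ivs : List (List Int)) (dp : List Int) (m : Nat) (hmn : m < dp.length) :
    ∀ k : Nat, 1 ≤ k → k ≤ m →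
      (PySem.List.pyRange 0 (k : Int)).foldl (fun (st : Int × List Int) j =>
          let mv := if pvKey1 (PySem.List.pyGetD ivs j []) ≤ pvKey0 (PySem.List.pyGetD ivs (m : Int) []) then
              max st.1 (PySem.List.pyGetD st.2 j 0) else st.1
          (mv, PySem.List.pySetD st.2 (m : Int) (mv + 1))) ((0 : Int), dp)
      = ((PySem.List.pyRange 0 (k : Int)).foldl (fun mv j =>
            if pvKey1 (PySem.List.pyGetD ivs j []) ≤ pvKey0 (PySem.List.pyGetD ivs (m : Int) []) then
              max mv (PySem.List.pyGetD dp j 0) else mv) 0,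
         PySem.List.pySetD dp (m : Int)
           (((PySem.List.pyRange 0 (k : Int)).foldl (fun mv j =>
            if pvKey1 (PySem.List.pyGetD ivs j []) ≤ pvKey0 (PySem.List.pyGetD ivs (m : Int) []) then
              max mv (PySem.List.pyGetD dp j 0) else mv) 0) + 1)) := by
  intro k
  induction k with
  | zero => intro h; omega
  | succ k ihk =>
    intro _ hkm
    by_cases hk0 : k = 0
    · subst hk0
      have h1 : ((1 : Nat) : Int) = 0 + 1 := by norm_num
      rw [h1, PySem.List.pyRange_one_succ_right (by norm_num), PySem.List.pyRange_one_eq_nil (le_refl 0)]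
      simp
    · have hk1 : 1 ≤ k := Nat.one_le_iff_ne_zero.mpr hk0
      have hcast : ((k + 1 : Nat) : Int) = (k : Int) + 1 := by push_cast; ring
      rw [hcast, PySem.List.pyRange_one_succ_right (by positivity), List.foldl_append,
        List.foldl_append, ihk hk1 (by omega)]
      simp only [List.foldl_cons, List.foldl_nil]
      have hread : ∀ v : Int, PySem.List.pyGetD (PySem.List.pySetD dp (m : Int) v) (k : Int) 0
          = PySem.List.pyGetD dp (k : Int) 0 := by
        intro v
        rw [PySem.List.pyGetD_pySetD_natCast dp m k v 0 hmn]
        simp [show k ≠ m by omega]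
      rw [hread]
      congr 1
      rw [PySem.List.pySetD_natCast, PySem.List.pySetD_natCast, PySem.List.pySetD_natCast,
        List.set_set]

-- the pure running max of the inner loop is pvMaxOver of the DP table built so far
theorem pvDP_getElem_fst (ys : List (Int × Int)) (j : Nat) (h : j < (pvDP ys).length) :
    ((pvDP ys)[j]).1 = ys[j]'(by rw [← pvDP_length ys]; exact h) := by
  have h2 : j < ((pvDP ys).map (·.1)).length := by simpa using h
  have h5 : ((pvDP ys).map (·.1))[j]'h2 = ((pvDP ys)[j]).1 := List.getElem_map ..
  rw [← h5]
  exact List.getElem_of_eq (pvDP_fst ys) _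

theorem pvInner_pure_eval (ivs : List (List Int)) (S : Int) (m : Nat) (hm : m ≤ ivs.length)
    (tail : List Int) :
    (PySem.List.pyRange 0 (m : Int)).foldl (fun mv j =>
        if pvKey1 (PySem.List.pyGetD ivs j []) ≤ S then
          max mv (PySem.List.pyGetD ((pvDP ((ivs.map pvF).take m)).map (·.2) ++ tail) j 0) else mv) 0
    = pvMaxOver (pvDP ((ivs.map pvF).take m)) S := by
  have hE : (pvDP ((ivs.map pvF).take m)).length = m := by
    rw [pvDP_length, List.length_take, List.length_map]; omega
  have hcongr : (PySem.List.pyRange 0 (m : Int)).foldl (fun mv j =>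
        if pvKey1 (PySem.List.pyGetD ivs j []) ≤ S then
          max mv (PySem.List.pyGetD ((pvDP ((ivs.map pvF).take m)).map (·.2) ++ tail) j 0) else mv) 0
      = (PySem.List.pyRange 0 (m : Int)).foldl (fun mv j =>
          (fun mv (q : (Int × Int) × Int) => if q.1.2 ≤ S then max mv q.2 else mv) mv
            (PySem.List.pyGetD (pvDP ((ivs.map pvF).take m)) j ((0, 0), 0))) 0 := by
    refine PySem.List.foldl_congr_mem _ _ _ _ ?_
    intro acc j hj
    obtain ⟨hj0, hjm⟩ := PySem.List.mem_pyRange_one.mp hj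
    obtain ⟨j0, rfl⟩ : ∃ j0 : Nat, j = (j0 : Int) := ⟨j.toNat, (Int.toNat_of_nonneg hj0).symm⟩
    have hj0m : j0 < m := by exact_mod_cast hjm
    have h1 : PySem.List.pyGetD (pvDP ((ivs.map pvF).take m)) (j0 : Int) ((0, 0), 0)
        = (pvDP ((ivs.map pvF).take m))[j0]'(by omega) := by
      rw [PySem.List.pyGetD_natCast, List.getD_eq_getElem _ _ (by omega)]
    have h2 : PySem.List.pyGetD ivs (j0 : Int) [] = ivs[j0]'(by omega) := by
      rw [PySem.List.pyGetD_natCast, List.getD_eq_getElem _ _ (by omega)]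
    have h3 : PySem.List.pyGetD ((pvDP ((ivs.map pvF).take m)).map (·.2) ++ tail) (j0 : Int) 0
        = ((pvDP ((ivs.map pvF).take m))[j0]'(by omega)).2 := by
      rw [PySem.List.pyGetD_natCast,
        List.getD_eq_getElem _ _ (by simp only [List.length_append, List.length_map]; omega),
        List.getElem_append_left (by simp only [List.length_map]; omega), List.getElem_map]
    have h4 : ((pvDP ((ivs.map pvF).take m))[j0]'(by omega)).1.2
        = pvKey1 (ivs[j0]'(by omega)) := by
      rw [pvDP_getElem_fst]
      rw [List.getElem_take, List.getElem_map]
      rfl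
    rw [h1, h2, h3]
    simp only
    rw [h4]
  rw [hcongr]
  have hlen : (m : Int) = PySem.List.len (pvDP ((ivs.map pvF).take m)) := by
    simp [PySem.List.len, hE]
  rw [hlen]
  exact PySem.List.foldl_pyRange_zero_pyGetD _ ((0, 0), 0)
    (fun mv q => if q.1.2 ≤ S then max mv q.2 else mv) 0

-- the outer loop fills the dp array with the pvDP values, zeros beyond
theorem pvOuter (ivs : List (List Int)) :
    ∀ m : Nat, 1 ≤ m → m ≤ ivs.length →
      (PySem.List.pyRange 1 (m : Int)).foldl (fun dp i =>
          ((PySem.List.pyRange 0 i).foldl (fun (st : Int × List Int) j =>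
              let mv := if pvKey1 (PySem.List.pyGetD ivs j []) ≤ pvKey0 (PySem.List.pyGetD ivs i []) then
                  max st.1 (PySem.List.pyGetD st.2 j 0) else st.1
              (mv, PySem.List.pySetD st.2 i (mv + 1))) ((0 : Int), dp)).2)
        (PySem.List.pySetD (List.replicate ivs.length (0 : Int)) 0 1)
      = (pvDP ((ivs.map pvF).take m)).map (·.2) ++ List.replicate (ivs.length - m) 0 := by
  intro m
  induction m with
  | zero => intro h; omega
  | succ m ihm =>
    intro _ hmn
    by_cases hm0 : m = 0
    · subst hm0
      rw [show ((0 + 1 : Nat) : Int) = 1 by norm_num, PySem.List.pyRange_one_eq_nil (le_refl 1)]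
      simp only [List.foldl_nil]
      obtain ⟨iv0, ivt, rfl⟩ : ∃ a t, ivs = a :: t := by
        cases ivs with
        | nil => simp at hmn
        | cons a t => exact ⟨a, t, rfl⟩
      rw [show (0 : Int) = ((0 : Nat) : Int) by norm_num, PySem.List.pySetD_natCast]
      simp [List.replicate_succ, pvDP, pvEntryStep, pvMaxOver]
    · have hm1 : 1 ≤ m := Nat.one_le_iff_ne_zero.mpr hm0
      have hmn' : m < ivs.length := by omega
      have hcast : ((m + 1 : Nat) : Int) = (m : Int) + 1 := by push_cast; ring
      rw [hcast, PySem.List.pyRange_one_succ_right (by exact_mod_cast hm1), List.foldl_append,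
        ihm hm1 (by omega)]
      simp only [List.foldl_cons, List.foldl_nil]
      have hE : (pvDP ((ivs.map pvF).take m)).length = m := by
        rw [pvDP_length, List.length_take, List.length_map]; omega
      have hdplen : ((pvDP ((ivs.map pvF).take m)).map (·.2)
          ++ List.replicate (ivs.length - m) (0 : Int)).length = ivs.length := by
        simp [List.length_append, List.length_map, hE]; omega
      rw [pvInner_sep ivs _ m (by rw [hdplen]; omega) m hm1 (le_refl m)]
      simp only
      rw [pvInner_pure_eval ivs _ m (by omega) _]
      have h2 : PySem.List.pyGetD ivs (m : Int) [] = ivs[m]'hmn' := by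
        rw [PySem.List.pyGetD_natCast, List.getD_eq_getElem _ _ hmn']
      have htake : (ivs.map pvF).take (m + 1) = (ivs.map pvF).take m ++ [pvF (ivs[m]'hmn')] := by
        rw [List.take_add_one, List.getElem?_eq_getElem (by simpa using hmn'), List.getElem_map]
        rfl
      rw [htake, pvDP_snoc]
      rw [PySem.List.pySetD_natCast, List.set_append]
      rw [if_neg (by simp [List.length_map, hE])]
      simp only [List.length_map, hE, Nat.sub_self]
      rw [show ivs.length - m = (ivs.length - m - 1) + 1 by omega, List.replicate_succ,
        List.set_cons_zero]
      simp only [pvEntryStep, List.map_append, List.map_cons, List.map_nil]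
      rw [h2]
      have : (1 : Int) + pvMaxOver (pvDP ((ivs.map pvF).take m)) (pvKey0 (ivs[m]'hmn'))
          = pvMaxOver (pvDP ((ivs.map pvF).take m)) (pvKey0 (ivs[m]'hmn')) + 1 := by ring
      rw [show (pvF (ivs[m]'hmn')).1 = pvKey0 (ivs[m]'hmn') from rfl, this]
      simp [List.append_assoc, show ivs.length - (m + 1) = ivs.length - m - 1 by omega]

-- closed forms of the two ports, and the core greedy = DP theorem
theorem pvA_closed (intervals : List (List Int)) (h0 : intervals ≠ []) :
    eraseOverlapIntervals_soln1 intervals =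
      (intervals.length : Int) -
        ((PySem.List.max? ((pvDP (PySem.List.sorted2 (intervals.map pvF) Prod.fst Prod.snd false)).map (·.2))
          (fun x => x)).getD 0) := by
  have hlen : (PySem.List.sorted2 intervals pvKey0 pvKey1 false).length = intervals.length :=
    (PySem.List.sorted2_perm intervals pvKey0 pvKey1 false).length_eq
  have hne : intervals.length ≠ 0 := fun h => h0 (List.eq_nil_of_length_eq_zero h)
  unfold eraseOverlapIntervals_soln1
  simp only []
  rw [if_neg (by exact_mod_cast hne)]
  have houter := pvOuter (PySem.List.sorted2 intervals pvKey0 pvKey1 false)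
    (PySem.List.sorted2 intervals pvKey0 pvKey1 false).length (by omega) (le_refl _)
  rw [show ((intervals.length : Nat) : Int)
      = (((PySem.List.sorted2 intervals pvKey0 pvKey1 false).length : Nat) : Int) by rw [hlen],
    show List.replicate intervals.length (0 : Int)
      = List.replicate (PySem.List.sorted2 intervals pvKey0 pvKey1 false).length (0 : Int) by rw [hlen],
    houter]
  rw [show (PySem.List.sorted2 intervals pvKey0 pvKey1 false).length
      = ((PySem.List.sorted2 intervals pvKey0 pvKey1 false).map pvF).length by simp,
    List.take_length, Nat.sub_self, List.replicate_zero, List.append_nil, pvMap_sorted2]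

theorem pvB_closed (intervals : List (List Int)) :
    eraseOverlapIntervals_soln1_alt intervals =
      ((PySem.List.sorted2 (intervals.map pvF) Prod.fst Prod.snd false).foldl pvGStep ((0 : Int), none)).1 := rfl

theorem pvCore (xs : List (Int × Int)) (hpw : xs.Pairwise (fun a b => a.1 ≤ b.1)) (hne : xs ≠ []) :
    (xs.length : Int) - ((PySem.List.max? ((pvDP xs).map (·.2)) (fun x => x)).getD 0)
    = (xs.foldl pvGStep ((0 : Int), none)).1 := by
  obtain ⟨x0, rest, rfl⟩ : ∃ a t, xs = a :: t := by
    cases xs with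
    | nil => exact absurd rfl hne
    | cons a t => exact ⟨a, t, rfl⟩
  have hInv0 : pvInv [(x0, 1)] 1 x0.2 := by
    refine ⟨?_, ⟨(x0, 1), by simp, rfl, rfl⟩, ?_, ?_⟩
    · intro q hq; simp only [List.mem_singleton] at hq; subst hq; simp
    · intro q hq _; simp only [List.mem_singleton] at hq; subst hq; simp
    · intro q hq h2; simp only [List.mem_singleton] at hq; subst hq; simp at h2
  have hst : ∀ q ∈ [(x0, (1 : Int))], ∀ r ∈ rest, q.1.1 ≤ r.1 := by
    intro q hq r hr
    simp only [List.mem_singleton] at hq; subst hq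
    exact (List.pairwise_cons.mp hpw).1 r hr
  obtain ⟨K', cur', hInvF, heq⟩ :=
    pvMain rest [(x0, 1)] 1 x0.2 0 hInv0 hst (List.pairwise_cons.mp hpw).2
  have hdp : pvDP (x0 :: rest) = rest.foldl pvEntryStep [(x0, 1)] := by
    show (x0 :: rest).foldl pvEntryStep [] = _
    rw [List.foldl_cons]
    norm_num [pvEntryStep, pvMaxOver]
  obtain ⟨hA, ⟨q0, hq0m, hq0K, _⟩, _, _⟩ := hInvF
  have hKmem : K' ∈ (pvDP (x0 :: rest)).map (·.2) := by
    rw [hdp]; exact List.mem_map.mpr ⟨q0, hq0m, hq0K⟩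
  have hMeq : (PySem.List.max? ((pvDP (x0 :: rest)).map (·.2)) (fun x => x)).getD 0 = K' := by
    cases hM : PySem.List.max? ((pvDP (x0 :: rest)).map (·.2)) (fun x => x) with
    | none =>
      exact absurd ((PySem.List.max?_eq_none_iff _ _).mp hM)
        (by simp [← List.length_eq_zero_iff, pvDP_length])
    | some M =>
      have h1 : K' ≤ M := PySem.List.max?_isMax hM K' hKmem
      have h2 : M ≤ K' := by
        obtain ⟨q, hqm, hqv⟩ := List.mem_map.mp (PySem.List.max?_mem hM)
        rw [hdp] at hqm
        have := (hA q hqm).2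
        omega
      simp only [Option.getD_some]
      omega
  rw [hMeq, List.foldl_cons,
    show pvGStep ((0 : Int), none) x0 = ((0 : Int), some x0.2) from rfl, heq]
  simp only [List.length_cons]
  push_cast
  ring

-- ===== VERDICT (by name: the statement is the Claim_ definition above) =====
theorem eraseOverlapIntervals_soln1_spec : Claim_equal_eraseOverlapIntervals_soln1 := by
  intro intervals _hdom _hpre
  unfold Spec_eraseOverlapIntervals_soln1
  rcases eq_or_ne intervals [] with rfl | h0
  · rfl
  · have hslen : (PySem.List.sorted2 (intervals.map pvF) Prod.fst Prod.snd false).length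
        = intervals.length := by
      rw [(PySem.List.sorted2_perm _ _ _ _).length_eq, List.length_map]
    have hsne : PySem.List.sorted2 (intervals.map pvF) Prod.fst Prod.snd false ≠ [] := by
      intro h
      apply h0
      have := congrArg List.length h
      rw [hslen] at this
      exact List.eq_nil_of_length_eq_zero (by simpa using this)
    rw [pvA_closed intervals h0, pvB_closed intervals, ← pvCore _ (pvSorted2_pairwise_fst _) hsne,
      hslen]
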